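-- pv_equiv track=rewrite | github.com/jdvalenzuelah/deteccion-correccion-errores | hamming.py | posRedundante
-- ===== SOURCE A (Python) =====
-- def posRedundante(data, r):
-- 	j = 0
-- 	k = 1
-- 	n = len(data)
-- 	posicion = ''
--
-- 	#Dectectamos si es impar '0' o par '1'
-- 	for i in range(1, n+(r+1)):
-- 		if(i== 2**j):
-- 			posicion = posicion + '0'
-- 			j += 1
-- 		else:
-- 			posicion = posicion
-- 			k += 1
-- 	return posicion[::-1]
-- ===== SOURCE B (Python) =====
-- def posRedundante(data, r):
--     # count of powers of two in [1, len(data)+r] is the bit length of len(data)+r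
--     return '0' * max(len(data) + r, 0).bit_length()
-- ===== Notes on version B (the rewrite author's own statement) =====
-- stated objective: faster
-- what changed: Replaces the O(n+r) loop that tests each i in [1, n+r] against successive powers of two with the closed form '0' * bit_length(max(n+r,0)); the reverse becomes a no-op on an all-'0' string.
import Mathlib
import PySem

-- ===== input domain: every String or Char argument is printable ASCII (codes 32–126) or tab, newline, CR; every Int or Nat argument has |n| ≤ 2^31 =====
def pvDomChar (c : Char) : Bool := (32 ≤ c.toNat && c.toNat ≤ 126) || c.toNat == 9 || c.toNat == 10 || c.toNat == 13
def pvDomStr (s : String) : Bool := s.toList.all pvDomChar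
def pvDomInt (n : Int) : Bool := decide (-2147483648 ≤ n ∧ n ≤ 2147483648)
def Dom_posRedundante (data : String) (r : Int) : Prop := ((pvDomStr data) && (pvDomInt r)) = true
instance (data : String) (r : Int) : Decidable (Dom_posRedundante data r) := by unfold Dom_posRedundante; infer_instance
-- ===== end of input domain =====

-- B replaces A's O(n+r) scan for powers of two with the closed form '0' * bit_length(max(n+r,0)) (faster).

-- ===== PORT A =====
-- literal port of A: fold over range(1, n+(r+1)) with state (j, k, posicion);
-- posicion is kept as List Char; posicion[::-1] is reverse (PySem.List.slice?_none_none_neg_one)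
def posRedundante (data : String) (r : Int) : String :=
  String.ofList
    (((PySem.List.pyRange 1 (PySem.Str.len data + (r + 1)) 1).foldl
      (fun (st : Int × Int × List Char) i =>
        if i = 2 ^ st.1.toNat then (st.1 + 1, st.2.1, st.2.2 ++ ['0'])
        else (st.1, st.2.1 + 1, st.2.2))
      (0, 1, ([] : List Char))).2.2.reverse)

-- ===== PORT B =====
-- port of Source B: max(len(data)+r, 0) is (… ).toNat; .bit_length() is Nat.size; '0' * k is replicate
def posRedundante_alt (data : String) (r : Int) : String :=
  String.ofList (List.replicate (Nat.size (PySem.Str.len data + r).toNat) '0')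

-- ===== PRECONDITION & SPEC =====
def Spec_posRedundante (data : String) (r : Int) (out : String) : Prop := out = posRedundante_alt data r
instance (data : String) (r : Int) (out : String) : Decidable (Spec_posRedundante data r out) := by unfold Spec_posRedundante; infer_instance

-- ===== CLAIM (what is proved, stated in full; the proofs are below) =====
def Claim_equal_posRedundante : Prop := ∀ (data : String) (r : Int), Dom_posRedundante data r → Spec_posRedundante data r (posRedundante data r)

-- ===== LEMMAS AND PROOFS =====

theorem pvSize_succ_pow (t : Nat) (h : t + 1 = 2 ^ Nat.size t) :
    Nat.size (t + 1) = Nat.size t + 1 := by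
  have h1 : Nat.size t < Nat.size (t + 1) := Nat.lt_size.mpr (le_of_eq h.symm)
  have h2 : Nat.size (t + 1) ≤ Nat.size t + 1 := by
    apply Nat.size_le.mpr
    have := Nat.lt_size_self t
    rw [pow_succ]
    omega
  omega

theorem pvSize_succ_not_pow (t : Nat) (h : t + 1 ≠ 2 ^ Nat.size t) :
    Nat.size (t + 1) = Nat.size t := by
  have h1 : t < 2 ^ Nat.size t := Nat.lt_size_self t
  have h2 : Nat.size (t + 1) ≤ Nat.size t := Nat.size_le.mpr (by omega)
  have h3 : Nat.size t ≤ Nat.size (t + 1) := Nat.size_le_size (by omega)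
  omega

-- loop invariant: after processing 1..t the state is (size t, t+1-size t, replicate (size t) '0')
theorem pvLoop (t : Nat) :
    (PySem.List.pyRange 1 ((t : Int) + 1) 1).foldl
      (fun (st : Int × Int × List Char) i =>
        if i = 2 ^ st.1.toNat then (st.1 + 1, st.2.1, st.2.2 ++ ['0'])
        else (st.1, st.2.1 + 1, st.2.2))
      (0, 1, ([] : List Char))
    = ((Nat.size t : Int), (t : Int) + 1 - (Nat.size t : Int),
        List.replicate (Nat.size t) '0') := by
  induction t with
  | zero => simp [PySem.List.pyRange_one_eq_nil, Nat.size_zero]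
  | succ t ih =>
    have hsplit : PySem.List.pyRange 1 ((↑(t + 1) : Int) + 1) 1
        = PySem.List.pyRange 1 ((t : Int) + 1) 1 ++ [((t : Int) + 1)] := by
      have : ((↑(t + 1) : Int) + 1) = ((t : Int) + 1) + 1 := by push_cast; ring
      rw [this, PySem.List.pyRange_one_succ_right (by omega)]
    rw [hsplit, List.foldl_append, ih]
    simp only [List.foldl_cons, List.foldl_nil]
    by_cases hp : (t : Int) + 1 = 2 ^ ((Nat.size t : Int)).toNat
    · have hp' : t + 1 = 2 ^ Nat.size t := by
        have : ((Nat.size t : Int)).toNat = Nat.size t := by simp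
        rw [this] at hp
        exact_mod_cast hp
      rw [if_pos hp]
      have hs := pvSize_succ_pow t hp'
      rw [hs]
      have h1 : t < 2 ^ Nat.size t := Nat.lt_size_self t
      simp only [Prod.mk.injEq]
      exact ⟨by push_cast; ring, by push_cast; omega, by rw [List.replicate_succ']⟩
    · rw [if_neg hp]
      have hp' : t + 1 ≠ 2 ^ Nat.size t := by
        intro he
        apply hp
        have : ((Nat.size t : Int)).toNat = Nat.size t := by simp
        rw [this]
        exact_mod_cast he
      have hs := pvSize_succ_not_pow t hp'
      rw [hs]
      have h2 : (↑(t + 1) : Int) + 1 - ↑t.size = ↑t + 1 - ↑t.size + 1 := by push_cast; ring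
      rw [h2]

theorem posRedundante_spec : Claim_equal_posRedundante := by
  intro data r _
  unfold Spec_posRedundante posRedundante posRedundante_alt
  by_cases h : PySem.Str.len data + r ≤ 0
  · have he : PySem.List.pyRange 1 (PySem.Str.len data + (r + 1)) 1 = [] :=
      PySem.List.pyRange_one_eq_nil (by omega)
    have h0 : (PySem.Str.len data + r).toNat = 0 := by omega
    rw [he, h0]
    simp
  · have hm : PySem.Str.len data + (r + 1)
        = (((PySem.Str.len data + r).toNat : Int)) + 1 := by omega
    rw [hm, pvLoop ((PySem.Str.len data + r).toNat)]
    simp [List.reverse_replicate]
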